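-- pv_equiv track=rewrite | github.com/Pangpyo/TIL | programmers/외톨이알파벳.py | solution
-- ===== SOURCE A (Python) =====
-- def solution(input_string):
--     dic = {}
--     check = ''
--     for s in input_string :
--         if s not in dic :
--             dic[s] = 0
--     for s in input_string :
--         if check == s :
--             continue
--         else :
--             check = s
--             dic[s] += 1
--     answer = ''
--     for k, v in dic.items() :
--         if v >= 2 :
--             answer += k
--     answer = sorted(answer)
--     if not answer :
--         answer = 'N'
--     answer = ''.join(answer)
--     return answer
-- ===== SOURCE B (Python) =====
-- def solution(input_string):
--     # Per-candidate search: a character is "lonely" iff it occurs again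
--     # strictly after the end of its first run.
--     lonely = ''
--     n = len(input_string)
--     for c in sorted(set(input_string)):
--         i = input_string.find(c)          # first occurrence (c is in the string)
--         while i < n and input_string[i] == c:
--             i += 1                        # skip the first run of c
--         if c in input_string[i:]:
--             lonely += c
--     return lonely or 'N'
-- ===== Notes on version B (the rewrite author's own statement) =====
-- stated objective: alternative
-- what changed: A makes one dict-zeroing pass plus a sentinel-tracking scan that counts every run head in a dict and then filters; B keeps no run structure or counter at all: for each candidate character of sorted(set(s)) it searches the string directly (find the first occurrence, skip that run, test membership in the remaining suffix).
import Mathlib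
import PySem

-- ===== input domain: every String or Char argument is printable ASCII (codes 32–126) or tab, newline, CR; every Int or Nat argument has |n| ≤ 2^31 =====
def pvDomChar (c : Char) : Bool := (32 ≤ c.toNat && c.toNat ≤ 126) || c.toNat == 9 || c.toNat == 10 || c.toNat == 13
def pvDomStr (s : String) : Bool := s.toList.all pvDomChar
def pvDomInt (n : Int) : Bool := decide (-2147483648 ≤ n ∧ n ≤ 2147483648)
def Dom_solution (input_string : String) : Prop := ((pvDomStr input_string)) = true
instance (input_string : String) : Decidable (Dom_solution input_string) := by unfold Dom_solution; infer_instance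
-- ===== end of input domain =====

-- B abandons A's dict-counting of run heads: for each candidate character it searches the string
-- directly (first occurrence, skip that run, membership test on the rest); alternative algorithm of similar cost, no speed claim.


-- ===== PORT A =====
-- first loop: 'if s not in dic: dic[s] = 0'
def solLoop1 : List Char → PySem.Dict Char Int → PySem.Dict Char Int
  | [], dic => dic
  | s :: rest, dic => solLoop1 rest (if !(dic.contains s) then dic.insert s 0 else dic)

-- second loop: sentinel 'check' (a string, initially ''), 'dic[s] += 1' at each run head
-- ('dic[s] += 1' is ported as modify with default 0; the first loop guarantees the key is present,
--  so the default is never used and Python's KeyError cannot occur)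
def solLoop2 : List Char → String → PySem.Dict Char Int → PySem.Dict Char Int
  | [], _, dic => dic
  | s :: rest, check, dic =>
    if check == s.toString then solLoop2 rest check dic
    else solLoop2 rest s.toString (dic.modify s 0 (· + 1))

def solution (input_string : String) : String :=
  let dic := solLoop1 input_string.toList PySem.Dict.empty
  let dic := solLoop2 input_string.toList "" dic
  -- 'answer += k' accumulates a Python string; ported as its list of characters
  let answer : List Char :=
    dic.items.foldl (fun acc kv => if kv.2 ≥ 2 then acc ++ [kv.1] else acc) []
  let answer := PySem.List.sorted answer (fun x => x)
  let answer := if answer = [] then ['N'] else answer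
  String.mk answer  -- ''.join

-- ===== PORT B =====
-- 'while i < n and input_string[i] == c: i += 1'; i starts at input_string.find(c), which is ≥ 0
-- because c is drawn from set(input_string), so the Nat index is exact
def skipRun (cs : List Char) (c : Char) (i : Nat) : Nat :=
  if h : i < cs.length then
    if cs[i] = c then skipRun cs c (i + 1) else i
  else i
termination_by cs.length - i

def solution_alt (input_string : String) : String :=
  let cs := input_string.toList
  -- for c in sorted(set(input_string)): … lonely += c
  let lonely : List Char :=
    (PySem.List.sorted (PySem.Set.ofList cs) (fun x => x)).foldl
      (fun acc c =>
        if PySem.Chars.isIn [c]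
            (PySem.List.slice cs (some ((skipRun cs c (PySem.Chars.find cs [c]).toNat : Nat) : Int)) none)
        then acc ++ [c] else acc) []
  if lonely = [] then "N" else String.mk lonely

-- ===== PRECONDITION & SPEC =====
def Spec_solution (input_string : String) (out : String) : Prop := out = solution_alt input_string
instance (input_string : String) (out : String) : Decidable (Spec_solution input_string out) := by unfold Spec_solution; infer_instance

-- ===== CLAIM (what is proved, stated in full; the proofs are below) =====
def Claim_equal_solution : Prop := ∀ (input_string : String), Dom_solution input_string → Spec_solution input_string (solution input_string)

-- ===== LEMMAS AND PROOFS =====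

-- run heads of a list relative to the sentinel string 'check' (A's loop-2 traversal order)
def runsC : String → List Char → List Char
  | _, [] => []
  | check, s :: rest =>
    if check == s.toString then runsC check rest
    else s :: runsC s.toString rest

theorem singleton_inj (a b : Char) : String.singleton a = String.singleton b ↔ a = b := by
  constructor
  · intro h; have := congrArg String.toList h; simpa using this
  · intro h; rw [h]

theorem beq_empty_toString (c : Char) : (("" : String) == c.toString) = false := by
  simp [Char.toString]

theorem toString_ne (a b : Char) (h : a ≠ b) : a.toString ≠ b.toString := by
  simp [Char.toString, singleton_inj, h]

theorem runsC_sub (t : List Char) : ∀ ck c, c ∈ runsC ck t → c ∈ t := by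
  induction t with
  | nil => intro ck c h; simp [runsC] at h
  | cons s rest ih =>
    intro ck c h
    simp only [runsC] at h
    split at h
    · exact List.mem_cons_of_mem _ (ih _ _ h)
    · rcases List.mem_cons.mp h with h | h
      · simp [h]
      · exact List.mem_cons_of_mem _ (ih _ _ h)

theorem loop1_get? (t : List Char) : ∀ d c, (solLoop1 t d).get? c =
    if d.contains c then d.get? c else if c ∈ t then some 0 else none := by
  induction t with
  | nil =>
    intro d c
    by_cases h : d.contains c
    · simp [solLoop1, h]
    · simp [solLoop1, h, PySem.Dict.get?_eq_none_iff_contains]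
  | cons s rest ih =>
    intro d c
    simp only [solLoop1]
    by_cases hs : d.contains s
    · rw [if_neg (by simp [hs])]
      rw [ih]
      by_cases hc : d.contains c
      · simp [hc]
      · have hcs : c ≠ s := fun h => hc (h ▸ hs)
        simp [hc, hcs]
    · rw [if_pos (by simp [hs])]
      rw [ih]
      by_cases hc : d.contains c
      · have hcs : c ≠ s := fun h => hs (h ▸ hc)
        simp [PySem.Dict.contains_insert, PySem.Dict.get?_insert, hc, hcs]
      · by_cases hcs : c = s
        · subst hcs
          simp [PySem.Dict.contains_insert, PySem.Dict.get?_insert, hc]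
        · simp [PySem.Dict.contains_insert, PySem.Dict.get?_insert, hc, hcs]

theorem loop1_nodup (t : List Char) : ∀ d, d.keys.Nodup → (solLoop1 t d).keys.Nodup := by
  induction t with
  | nil => intro d h; simpa [solLoop1] using h
  | cons s rest ih =>
    intro d h
    simp only [solLoop1]
    split
    · exact ih _ (PySem.Dict.nodup_keys_insert _ _ _ h)
    · exact ih _ h

theorem loop2_getD (t : List Char) : ∀ ck d c,
    (solLoop2 t ck d).getD c 0 = d.getD c 0 + ((runsC ck t).count c : Int) := by
  induction t with
  | nil => intro ck d c; simp [solLoop2, runsC]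
  | cons s rest ih =>
    intro ck d c
    simp only [solLoop2, runsC]
    split
    · exact ih ck d c
    · rw [ih]
      rw [PySem.Dict.getD_modify]
      by_cases hc : c = s
      · subst hc; simp [List.count_cons]; push_cast; ring
      · simp [hc, List.count_cons, Ne.symm hc]

theorem loop2_contains (t : List Char) : ∀ ck d c,
    (solLoop2 t ck d).contains c = (d.contains c || decide (c ∈ runsC ck t)) := by
  induction t with
  | nil => intro ck d c; simp [solLoop2, runsC]
  | cons s rest ih =>
    intro ck d c
    simp only [solLoop2, runsC]
    split
    · exact ih ck d c
    · rw [ih, PySem.Dict.contains_modify]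
      by_cases hc : c = s
      · subst hc; simp
      · have hb : (c == s) = false := by simp [hc]
        simp [hb, hc]
        rfl

theorem loop2_nodup (t : List Char) : ∀ ck d, d.keys.Nodup → (solLoop2 t ck d).keys.Nodup := by
  induction t with
  | nil => intro ck d h; simpa [solLoop2] using h
  | cons s rest ih =>
    intro ck d h
    simp only [solLoop2]
    split
    · exact ih ck d h
    · apply ih
      rw [PySem.Dict.keys_modify]
      exact PySem.Dict.nodup_keys_insert _ _ _ h

theorem answer_fold (items : List (Char × Int)) : ∀ acc : List Char,
    items.foldl (fun acc kv => if kv.2 ≥ 2 then acc ++ [kv.1] else acc) acc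
      = acc ++ (items.filter (fun p => p.2 ≥ 2)).map Prod.fst := by
  induction items with
  | nil => intro acc; simp
  | cons kv rest ih =>
    intro acc
    simp only [List.foldl_cons, List.filter_cons]
    by_cases h : kv.2 ≥ 2
    · simp [h, ih]
    · simp [h, ih]

theorem d1_get? (l : List Char) (c : Char) :
    (solLoop1 l PySem.Dict.empty).get? c = if c ∈ l then some 0 else none := by
  rw [loop1_get?]; simp

theorem d1_contains (l : List Char) (c : Char) :
    (solLoop1 l PySem.Dict.empty).contains c = decide (c ∈ l) := by
  rw [PySem.Dict.contains_eq_isSome_get?, d1_get?]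
  by_cases h : c ∈ l <;> simp [h]

theorem d1_getD (l : List Char) (c : Char) :
    (solLoop1 l PySem.Dict.empty).getD c 0 = 0 := by
  rw [PySem.Dict.getD_eq_get?_getD, d1_get?]
  by_cases h : c ∈ l <;> simp [h]

theorem d2_getD (l : List Char) (c : Char) :
    (solLoop2 l "" (solLoop1 l PySem.Dict.empty)).getD c 0 = ((runsC "" l).count c : Int) := by
  rw [loop2_getD, d1_getD]; ring

theorem d2_contains (l : List Char) (c : Char) :
    (solLoop2 l "" (solLoop1 l PySem.Dict.empty)).contains c = decide (c ∈ l) := by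
  rw [loop2_contains, d1_contains]
  by_cases h : c ∈ l
  · simp [h]
  · have : c ∉ runsC "" l := fun hm => h (runsC_sub _ _ _ hm)
    simp [h, this]

theorem d2_nodup (l : List Char) :
    (solLoop2 l "" (solLoop1 l PySem.Dict.empty)).keys.Nodup := by
  exact loop2_nodup _ _ _ (loop1_nodup _ _ (by simp [PySem.Dict.empty, PySem.Dict.keys]))

theorem memA (l : List Char) (c : Char) :
    c ∈ (((solLoop2 l "" (solLoop1 l PySem.Dict.empty)).items.filter
            (fun p => p.2 ≥ 2)).map Prod.fst)
      ↔ c ∈ l ∧ 2 ≤ ((runsC "" l).count c : Int) := by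
  set d2 := solLoop2 l "" (solLoop1 l PySem.Dict.empty) with hd2
  constructor
  · intro h
    rcases List.mem_map.mp h with ⟨⟨k, v⟩, hmem, rfl⟩
    rcases List.mem_filter.mp hmem with ⟨hit, hv⟩
    have hget : d2.get? k = some v :=
      (PySem.Dict.get?_eq_some_iff_mem_items d2 k v (d2_nodup l)).mpr hit
    have hcont : d2.contains k = true := by
      rw [PySem.Dict.contains_eq_isSome_get?, hget]; rfl
    have hkl : k ∈ l := by
      rw [hd2, d2_contains] at hcont; simpa using hcont
    have hval : v = ((runsC "" l).count k : Int) := by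
      have := PySem.Dict.getD_of_get?_eq_some _ 0 hget
      rw [hd2, d2_getD] at this
      omega
    refine ⟨hkl, ?_⟩
    rw [← hval]
    simpa using hv
  · rintro ⟨hcl, hcnt⟩
    have hcont : d2.contains c = true := by rw [hd2, d2_contains]; simpa using hcl
    obtain ⟨v, hget⟩ : ∃ v, d2.get? c = some v := by
      rw [PySem.Dict.contains_eq_isSome_get?] at hcont
      cases hg : d2.get? c with
      | none => rw [hg] at hcont; simp at hcont
      | some v => exact ⟨v, rfl⟩
    have hval : v = ((runsC "" l).count c : Int) := by
      have := PySem.Dict.getD_of_get?_eq_some _ 0 hget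
      rw [hd2, d2_getD] at this
      omega
    refine List.mem_map.mpr ⟨(c, v), List.mem_filter.mpr ⟨?_, ?_⟩, rfl⟩
    · exact (PySem.Dict.get?_eq_some_iff_mem_items d2 c v (d2_nodup l)).mp hget
    · simp only [ge_iff_le, decide_eq_true_eq]
      rw [hval]; exact hcnt

theorem nodupA (l : List Char) :
    (((solLoop2 l "" (solLoop1 l PySem.Dict.empty)).items.filter
        (fun p => p.2 ≥ 2)).map Prod.fst).Nodup := by
  have hsub : (((solLoop2 l "" (solLoop1 l PySem.Dict.empty)).items.filter
        (fun p => p.2 ≥ 2)).map Prod.fst).Sublist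
      ((solLoop2 l "" (solLoop1 l PySem.Dict.empty)).items.map Prod.fst) :=
    List.Sublist.map _ List.filter_sublist
  have hk : ((solLoop2 l "" (solLoop1 l PySem.Dict.empty)).items.map Prod.fst).Nodup := by
    have := d2_nodup l
    simpa [PySem.Dict.keys] using this
  exact hk.sublist hsub

-- ===== B-side lemmas =====

-- 'c in xs' for a single character is list membership
theorem isIn_singleton (c : Char) (xs : List Char) :
    PySem.Chars.isIn [c] xs = true ↔ c ∈ xs := by
  rw [PySem.Chars.isIn_iff_infix]
  constructor
  · rintro ⟨s, t, rfl⟩; simp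
  · intro h
    rcases List.append_of_mem h with ⟨s, t, rfl⟩
    exact ⟨s, t, by simp⟩

-- the first occurrence index turns drop into dropWhile
theorem drop_first_occ (c : Char) : ∀ (cs : List Char) (i : Nat),
    [c] <+: cs.drop i → (∀ j, j < i → ¬ [c] <+: cs.drop j) →
    cs.drop i = cs.dropWhile (fun x => x != c) := by
  intro cs
  induction cs with
  | nil => intro i h _; rcases h with ⟨t, ht⟩; simp at ht
  | cons a tl ih =>
    intro i h hmin
    cases i with
    | zero =>
      rcases h with ⟨t, ht⟩
      simp only [List.drop_zero] at ht ⊢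
      have ha : a = c := by
        have := congrArg (List.head? ·) ht
        simp at this
        exact this.symm
      subst ha
      simp [List.dropWhile_cons]
    | succ k =>
      have ha : a ≠ c := by
        intro hac
        exact hmin 0 (Nat.succ_pos k) ⟨tl, by simp [hac]⟩
      have : tl.drop k = tl.dropWhile (fun x => x != c) := by
        apply ih k
        · simpa using h
        · intro j hj hpre
          exact hmin (j + 1) (by omega) (by simpa using hpre)
      simpa [List.dropWhile_cons, ha] using this

theorem skipRun_drop (cs : List Char) (c : Char) : ∀ i : Nat,
    cs.drop (skipRun cs c i) = (cs.drop i).dropWhile (fun x => x == c) := by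
  intro i
  fun_induction skipRun cs c i with
  | case1 i h hc ih =>
    rw [ih]
    rw [List.drop_eq_getElem_cons h]
    simp [List.dropWhile_cons, hc]
  | case2 i h hc =>
    have hd := List.drop_eq_getElem_cons h
    rw [hd, List.dropWhile_cons, if_neg (by simp [hc])]
  | case3 i h =>
    have : cs.length ≤ i := by omega
    simp [List.drop_eq_nil_of_le this]

-- membership in run heads, sentinel not c
theorem empty_ne_toString (c : Char) : ("" : String) ≠ c.toString := by
  intro h
  have := beq_empty_toString c
  rw [h] at this
  simp at this

theorem mem_runsC_of_ne (c : Char) : ∀ (r : List Char) (ck : String), ck ≠ c.toString →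
    (c ∈ runsC ck r ↔ c ∈ r) := by
  intro r
  induction r with
  | nil => intro ck _; simp [runsC]
  | cons b r' ih =>
    intro ck hck
    simp only [runsC]
    by_cases hb : ck = b.toString
    · have hbc : b ≠ c := by
        intro h; subst h; exact hck hb
      rw [if_pos (by simp [Char.toString] at hb ⊢; simp [hb])]
      rw [ih ck hck]
      simp [Ne.symm hbc]
    · rw [if_neg (by simpa [Char.toString] using hb)]
      by_cases hbc : b = c
      · subst hbc; simp
      · rw [List.mem_cons, List.mem_cons]
        rw [ih b.toString (toString_ne b c hbc)]
        
-- after the first run of c: another c left ↔ c heads some later run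
theorem mem_dropWhile_runsC (c : Char) : ∀ t : List Char,
    (c ∈ t.dropWhile (fun x => x == c) ↔ c ∈ runsC c.toString t) := by
  intro t
  induction t with
  | nil => simp [runsC]
  | cons b r ih =>
    by_cases hb : b = c
    · subst hb
      simp only [runsC, List.dropWhile_cons]
      rw [if_pos (by simp), if_pos (by simp)]
      exact ih
    · simp only [runsC, List.dropWhile_cons]
      rw [if_neg (by simpa using hb), if_neg (by simpa [Char.toString, singleton_inj] using (fun h => hb h.symm))]
      rw [List.mem_cons, List.mem_cons]
      rw [mem_runsC_of_ne c r b.toString (toString_ne b c hb)]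

-- run-head count of c does not depend on a sentinel that is not c
theorem count_runsC_sentinel (c : Char) : ∀ (l : List Char) (ck ck' : String),
    ck ≠ c.toString → ck' ≠ c.toString →
    (runsC ck l).count c = (runsC ck' l).count c := by
  intro l
  induction l with
  | nil => intro ck ck' _ _; simp [runsC]
  | cons a t ih =>
    intro ck ck' hck hck'
    simp only [runsC]
    by_cases hac : a = c
    · subst hac
      rw [if_neg (by simpa using hck), if_neg (by simpa using hck')]
    · have hat : a.toString ≠ c.toString := toString_ne a c hac
      by_cases h1 : ck = a.toString
      · rw [if_pos (by simp [h1])]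
        by_cases h2 : ck' = a.toString
        · rw [if_pos (by simp [h2])]
          exact ih ck ck' hck hck'
        · rw [if_neg (by simpa [Char.toString, singleton_inj] using h2)]
          rw [List.count_cons_of_ne hac]
          exact ih ck a.toString hck hat
      · rw [if_neg (by simpa [Char.toString, singleton_inj] using h1)]
        rw [List.count_cons_of_ne hac]
        by_cases h2 : ck' = a.toString
        · rw [if_pos (by simp [h2])]
          exact ih a.toString ck' hat hck'
        · rw [if_neg (by simpa [Char.toString, singleton_inj] using h2)]
          rw [List.count_cons_of_ne hac]

-- B's membership test ↔ c appears in at least two runs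
theorem main_iff (c : Char) : ∀ l : List Char,
    (c ∈ (l.dropWhile (fun x => x != c)).dropWhile (fun x => x == c)
      ↔ (c ∈ l ∧ 2 ≤ (runsC "" l).count c)) := by
  intro l
  induction l with
  | nil => simp [runsC]
  | cons a t ih =>
    by_cases ha : a = c
    · subst ha
      rw [List.dropWhile_cons, if_neg (by simp)]
      rw [List.dropWhile_cons, if_pos (by simp)]
      rw [mem_dropWhile_runsC]
      have hr : runsC "" (a :: t) = a :: runsC a.toString t := by
        simp [runsC, beq_empty_toString]
      rw [hr, List.count_cons_self]
      constructor
      · intro h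
        refine ⟨by simp, ?_⟩
        have := List.count_pos_iff.mpr h
        omega
      · rintro ⟨-, h2⟩
        exact List.count_pos_iff.mp (by omega)
    · rw [List.dropWhile_cons, if_pos (by simp [ha])]
      rw [ih]
      have hr : runsC "" (a :: t) = a :: runsC a.toString t := by
        simp [runsC, beq_empty_toString]
      rw [hr, List.count_cons_of_ne ha]
      rw [count_runsC_sentinel c t a.toString "" (toString_ne a c ha) (empty_ne_toString c)]
      simp [Ne.symm ha]

theorem predB_iff (cs : List Char) (c : Char) (hc : c ∈ cs) :
    (PySem.Chars.isIn [c]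
        (PySem.List.slice cs (some ((skipRun cs c (PySem.Chars.find cs [c]).toNat : Nat) : Int)) none) = true)
      ↔ 2 ≤ (runsC "" cs).count c := by
  rw [PySem.List.slice_from_natCast]
  rw [isIn_singleton]
  have hin : [c] <:+: cs := by
    rcases List.append_of_mem hc with ⟨s, t, rfl⟩
    exact ⟨s, t, by simp⟩
  have hnn : 0 ≤ PySem.Chars.find cs [c] := (PySem.Chars.find_nonneg_iff cs [c]).mpr hin
  have hspec := PySem.Chars.find_spec (s := cs) (sub := [c]) hnn
  have hdrop : cs.drop (PySem.Chars.find cs [c]).toNat = cs.dropWhile (fun x => x != c) :=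
    drop_first_occ c cs _ hspec.1 (fun j hj => hspec.2 j hj)
  rw [skipRun_drop, hdrop, main_iff]
  simp [hc]

theorem solution_eq_core (input_string : String) :
    solution input_string = solution_alt input_string := by
  simp only [solution, solution_alt]
  rw [answer_fold, PySem.List.foldl_append_if_eq_filter]
  simp only [List.nil_append]
  set cs := input_string.toList with hcs
  set pB := fun c => PySem.Chars.isIn [c]
      (PySem.List.slice cs (some ((skipRun cs c (PySem.Chars.find cs [c]).toNat : Nat) : Int)) none)
    with hpB
  set listA := ((solLoop2 cs "" (solLoop1 cs PySem.Dict.empty)).items.filter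
      (fun p => p.2 ≥ 2)).map Prod.fst with hlistA
  set LB := (PySem.List.sorted (PySem.Set.ofList cs) (fun x => x)).filter pB with hLB
  have hpairLB : LB.Pairwise (· < ·) :=
    List.Pairwise.filter pB (PySem.List.sorted_ofList_pairwise_lt cs)
  have hnodupLB : LB.Nodup := hpairLB.imp ne_of_lt
  have hmem : ∀ c, c ∈ LB ↔ c ∈ listA := by
    intro c
    rw [hLB, List.mem_filter, PySem.List.mem_sorted, PySem.Set.mem_ofList, hlistA, memA]
    constructor
    · rintro ⟨h1, h2⟩
      have h3 := (predB_iff cs c h1).mp (by rw [hpB] at h2; exact h2)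
      exact ⟨h1, by exact_mod_cast h3⟩
    · rintro ⟨h1, h2⟩
      refine ⟨h1, ?_⟩
      rw [hpB]
      exact (predB_iff cs c h1).mpr (by exact_mod_cast h2)
  have hperm : LB.Perm listA := (List.perm_ext_iff_of_nodup hnodupLB (nodupA cs)).mpr hmem
  have hsorted : PySem.List.sorted listA (fun x => x) = LB :=
    PySem.List.sorted_eq_of_perm_of_pairwise_lt listA LB (fun x => x) hperm hpairLB
  rw [hsorted]
  by_cases hE : LB = []
  · rw [if_pos hE, if_pos hE]
    rfl
  · rw [if_neg hE, if_neg hE]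

-- ===== VERDICT (by name: the statement is the Claim_ definition above) =====
theorem solution_spec : Claim_equal_solution := by
  intro input_string _
  unfold Spec_solution
  exact solution_eq_core input_string
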